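-- pv_equiv track=rewrite | github.com/ningit/ctxform | ctxform/tfeval.py | evaluate_always
-- ===== SOURCE A (Python) =====
-- Trace = tuple[tuple[bool | None, ...], tuple[bool | None, ...]]
--
-- def evaluate_always(a: Trace) -> Trace:
-- 	"""Evaluate always over a trace"""
--
-- 	prefix, cycle = a
--
-- 	if False in cycle:
-- 		return (False,) * len(prefix), (False,) * len(cycle)
--
-- 	if None in cycle:
-- 		return (None,) * len(prefix), (None,) * len(cycle)
--
-- 	new_prefix = [False] * len(prefix)
--
-- 	for k in reversed(range(len(prefix))):
-- 		if prefix[k]: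
-- 			new_prefix[k] = True
-- 		else:
-- 			break
--
-- 	return tuple(new_prefix), (True,) * len(cycle)
-- ===== SOURCE B (Python) =====
-- def evaluate_always(a):
-- 	"""Evaluate always over a trace"""
-- 	prefix, cycle = a
--
-- 	if False in cycle:
-- 		return (False,) * len(prefix), (False,) * len(cycle)
--
-- 	if None in cycle:
-- 		return (None,) * len(prefix), (None,) * len(cycle)
--
-- 	return tuple(all(prefix[k:]) for k in range(len(prefix))), (True,) * len(cycle)
-- ===== Notes on version B (the rewrite author's own statement) =====
-- stated objective: simpler
-- what changed: The incremental backward break-loop computing the trailing-True run of the prefix is replaced by a direct suffix-conjunction comprehension all(prefix[k:]) for each index, with the two cycle guards kept.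
import Mathlib
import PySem

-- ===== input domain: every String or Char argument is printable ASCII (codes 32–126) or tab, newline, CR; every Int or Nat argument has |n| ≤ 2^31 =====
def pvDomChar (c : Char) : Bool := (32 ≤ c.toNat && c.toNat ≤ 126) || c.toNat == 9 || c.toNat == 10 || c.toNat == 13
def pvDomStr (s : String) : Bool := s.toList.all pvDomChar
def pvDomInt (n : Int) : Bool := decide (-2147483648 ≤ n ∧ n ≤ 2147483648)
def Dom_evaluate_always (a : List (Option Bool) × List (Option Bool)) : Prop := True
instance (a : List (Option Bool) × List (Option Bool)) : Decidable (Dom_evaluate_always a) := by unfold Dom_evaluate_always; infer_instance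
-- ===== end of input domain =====

-- B replaces A's incremental backward break-loop over the prefix by a direct
-- suffix-conjunction comprehension (all(prefix[k:]) for each k): simpler, same result.

-- ===== PORT A =====
-- the backward `for k in reversed(range(len(prefix)))` loop with break, building
-- new_prefix right-to-left; state = (list built so far, broken flag)
def pvLoopA (st : List (Option Bool) × Bool) (x : Option Bool) : List (Option Bool) × Bool :=
  if st.2 then (some false :: st.1, true)
  else if x = some true then (some true :: st.1, false)
  else (some false :: st.1, true)

def evaluate_always (a : List (Option Bool) × List (Option Bool)) : List (Option Bool) × List (Option Bool) :=
  let pfx := a.1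
  let cycle := a.2
  if some false ∈ cycle then
    (List.replicate pfx.length (some false), List.replicate cycle.length (some false))
  else if none ∈ cycle then
    (List.replicate pfx.length none, List.replicate cycle.length none)
  else
    ((pfx.reverse.foldl pvLoopA ([], false)).1, List.replicate cycle.length (some true))

-- ===== PORT B =====
def evaluate_always_alt (a : List (Option Bool) × List (Option Bool)) : List (Option Bool) × List (Option Bool) :=
  let pfx := a.1
  let cycle := a.2
  if some false ∈ cycle then
    (List.replicate pfx.length (some false), List.replicate cycle.length (some false))
  else if none ∈ cycle then
    (List.replicate pfx.length none, List.replicate cycle.length none)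
  else
    ((List.range pfx.length).map
        (fun k => if (pfx.drop k).all (fun y => y == some true) then some true else some false),
     List.replicate cycle.length (some true))

-- ===== PRECONDITION & SPEC =====
def Spec_evaluate_always (a : List (Option Bool) × List (Option Bool)) (out : List (Option Bool) × List (Option Bool)) : Prop := out = evaluate_always_alt a
instance (a : List (Option Bool) × List (Option Bool)) (out : List (Option Bool) × List (Option Bool)) : Decidable (Spec_evaluate_always a out) := by unfold Spec_evaluate_always; infer_instance

-- ===== CLAIM (what is proved, stated in full; the proofs are below) =====
def Claim_equal_evaluate_always : Prop := ∀ (a : List (Option Bool) × List (Option Bool)), Dom_evaluate_always a → Spec_evaluate_always a (evaluate_always a)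

-- ===== LEMMAS AND PROOFS =====

-- pulling one element off the front of B's suffix map
theorem pvTargetCons (x : Option Bool) (xs : List (Option Bool)) :
    (List.range (x :: xs).length).map
        (fun k => if ((x :: xs).drop k).all (fun y => y == some true) then some true else some false) =
      (if ((x :: xs).all (fun y => y == some true)) then some true else some false) ::
        (List.range xs.length).map
          (fun k => if (xs.drop k).all (fun y => y == some true) then some true else some false) := by
  rw [List.length_cons, List.range_succ_eq_map, List.map_cons, List.map_map]
  simp only [Function.comp_def, List.drop_succ_cons, List.drop_zero]
  rfl

-- the backward loop's foldr characterisation: first component is B's suffix map,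
-- second component records whether the loop has broken (= not all entries truthy)
theorem pvLoopA_foldr (xs : List (Option Bool)) :
    xs.foldr (fun x st => pvLoopA st x) ([], false) =
      ((List.range xs.length).map
        (fun k => if (xs.drop k).all (fun y => y == some true) then some true else some false),
       !xs.all (fun y => y == some true)) := by
  induction xs with
  | nil => simp
  | cons x rest ih =>
    rw [List.foldr_cons, ih, pvTargetCons]
    unfold pvLoopA
    by_cases hall : rest.all (fun y => y == some true)
    · by_cases hx : x = some true
      · simp [hall, hx, List.all_cons]
      · simp [hall, hx, List.all_cons]
    · simp [hall, List.all_cons]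

theorem pvLoopA_loop (xs : List (Option Bool)) :
    (xs.reverse.foldl pvLoopA ([], false)).1 =
      (List.range xs.length).map
        (fun k => if (xs.drop k).all (fun y => y == some true) then some true else some false) := by
  rw [List.foldl_reverse, pvLoopA_foldr]

-- ===== VERDICT (by name: the statement is the Claim_ definition above) =====
theorem evaluate_always_spec : Claim_equal_evaluate_always := by
  intro a _
  unfold Spec_evaluate_always evaluate_always evaluate_always_alt
  simp only [pvLoopA_loop]
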